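-- pv_equiv track=rewrite | github.com/SenecaOPS445/lab-4-btaylor31-1 | lab4e.py | is_digits
-- ===== SOURCE A (Python) =====
-- def is_digits(sobj):
--     # place code here - loop through each character in sobj
--     tmp_boolean = True
--     all_digits = '0123456789' # setting value for digits
--     for char in sobj:
--         if char in all_digits:
--             tmp_boolean = True
--         else:
--             tmp_boolean = False
--             return tmp_boolean
--
--     return tmp_boolean # provides return value
-- ===== SOURCE B (Python) =====
-- def is_digits(sobj):
--     return set(sobj) <= set('0123456789')
-- ===== Notes on version B (the rewrite author's own statement) =====
-- stated objective: idiomatic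
-- what changed: Replaces the early-exit character loop with a boolean flag by a single set-subset test: the distinct characters of sobj are compared against the digit set, removing the loop, branches and sentinel entirely.
import Mathlib
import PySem

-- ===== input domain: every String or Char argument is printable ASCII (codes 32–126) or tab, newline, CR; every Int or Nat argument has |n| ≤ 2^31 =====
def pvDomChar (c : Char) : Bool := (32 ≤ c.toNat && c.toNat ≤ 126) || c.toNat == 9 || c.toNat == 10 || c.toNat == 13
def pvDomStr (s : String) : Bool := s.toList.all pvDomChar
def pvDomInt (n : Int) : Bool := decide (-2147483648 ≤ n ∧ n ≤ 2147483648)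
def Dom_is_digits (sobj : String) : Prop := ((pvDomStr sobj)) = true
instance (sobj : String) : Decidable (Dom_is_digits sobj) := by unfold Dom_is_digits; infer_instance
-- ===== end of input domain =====

-- B replaces A's early-exit loop with a set-subset test: set(sobj) <= set('0123456789') (idiomatic; return value only).

-- ===== PORT A =====
-- literal port of A's loop: tmp_boolean, early return false on a non-digit
def is_digits_loop (tmp : Bool) : List Char → Bool
  | [] => tmp
  | c :: rest =>
    if ("0123456789".toList).contains c then is_digits_loop true rest
    else false

def is_digits (sobj : String) : Bool := is_digits_loop true sobj.toList

-- ===== PORT B =====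
def is_digits_alt (sobj : String) : Bool :=
  PySem.Set.issubset (PySem.Set.ofList sobj.toList) (PySem.Set.ofList "0123456789".toList)

-- ===== PRECONDITION & SPEC =====
def Spec_is_digits (sobj : String) (out : Bool) : Prop := out = is_digits_alt sobj
instance (sobj : String) (out : Bool) : Decidable (Spec_is_digits sobj out) := by unfold Spec_is_digits; infer_instance

-- ===== CLAIM (what is proved, stated in full; the proofs are below) =====
def Claim_equal_is_digits : Prop := ∀ (sobj : String), Dom_is_digits sobj → Spec_is_digits sobj (is_digits sobj)

-- ===== LEMMAS AND PROOFS =====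

theorem is_digits_loop_eq_all (l : List Char) :
    is_digits_loop true l = l.all (fun c => ("0123456789".toList).contains c) := by
  induction l with
  | nil => rfl
  | cons c rest ih =>
    simp only [is_digits_loop, List.all_cons]
    split_ifs with h
    · rw [ih, h, Bool.true_and]
    · rw [Bool.not_eq_true] at h
      rw [h, Bool.false_and]

theorem alt_eq_all (l : List Char) :
    PySem.Set.issubset (PySem.Set.ofList l) (PySem.Set.ofList "0123456789".toList)
      = l.all (fun c => ("0123456789".toList).contains c) := by
  by_cases h : ∀ x ∈ l, x ∈ "0123456789".toList
  · rw [Bool.eq_iff_iff]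
    simp only [PySem.Set.issubset_iff, PySem.Set.mem_ofList, List.all_eq_true]
    constructor
    · intro _ c hc; simpa using h c hc
    · intro _ x hx; exact h x hx
  · rw [Bool.eq_iff_iff]
    simp only [PySem.Set.issubset_iff, PySem.Set.mem_ofList, List.all_eq_true]
    constructor
    · intro hs; exact absurd (fun x hx => hs x hx) h
    · intro ha; exact absurd (fun x hx => by simpa using ha x hx) h

-- ===== VERDICT (by name: the statement is the Claim_ definition above) =====
theorem is_digits_spec : Claim_equal_is_digits := by
  intro sobj _
  unfold Spec_is_digits is_digits is_digits_alt
  rw [is_digits_loop_eq_all, alt_eq_all]
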